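-- pv_equiv track=rewrite | github.com/45H15H/Security-Laboratory | LAB_4/prime_extension_field.py | prime_powers
-- ===== SOURCE A (Python) =====
-- def is_prime(num):
--     if num <= 1:
--         return False
--     for i in range(2, int(num**0.5) + 1):
--         if num % i == 0:
--             return False
--     return True
--
-- def prime_powers(a, b):
--     primes = set()
--     powers_of_primes = set()
--     for num in range(a, b + 1):
--         if is_prime(num):
--             primes.add(num)
--             power = num
--             while power <= b:
--                 powers_of_primes.add(power)
--                 power *= num
--     return primes, powers_of_primes - primes # extension fields is power of primes but not actual primes
-- ===== SOURCE B (Python) =====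
-- def prime_powers(a, b):
--     if b < 2:
--         return set(), set()
--     sieve = bytearray(b'\x01') * (b + 1)
--     sieve[0] = 0
--     sieve[1] = 0
--     i = 2
--     while i * i <= b:
--         if sieve[i]:
--             sieve[i * i :: i] = bytes(len(range(i * i, b + 1, i)))
--         i += 1
--     primes = [n for n in range(max(a, 2), b + 1) if sieve[n]]
--     powers = set()
--     for p in primes:
--         q = p * p
--         while q <= b:
--             powers.add(q)
--             q *= p
--     return set(primes), powers
-- ===== Notes on version B (the rewrite author's own statement) =====
-- stated objective: faster
-- what changed: B replaces A's per-number trial division (is_prime called for every n in [a,b]) by a single Sieve of Eratosthenes bytearray up to b with slice-assignment striking, then collects the primes in [max(a,2),b] and generates each prime's proper powers p^2, p^3, ... <= b directly instead of building the full power set and subtracting the primes.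
import Mathlib
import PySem

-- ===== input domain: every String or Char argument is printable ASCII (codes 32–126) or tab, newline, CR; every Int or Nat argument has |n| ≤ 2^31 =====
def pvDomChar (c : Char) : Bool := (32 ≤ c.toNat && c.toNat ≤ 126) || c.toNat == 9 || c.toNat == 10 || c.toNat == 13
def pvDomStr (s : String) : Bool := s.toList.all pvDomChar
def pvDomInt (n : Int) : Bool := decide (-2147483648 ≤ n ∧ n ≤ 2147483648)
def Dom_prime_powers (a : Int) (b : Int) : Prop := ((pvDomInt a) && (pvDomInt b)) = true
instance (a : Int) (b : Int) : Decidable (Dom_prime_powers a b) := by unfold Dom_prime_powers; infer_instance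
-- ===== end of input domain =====

-- B replaces A's per-number trial division by one Sieve of Eratosthenes up to b (asymptotically faster); return values are proved equal.

-- ===== PORT A =====
-- 'for i in range(2, int(num**0.5) + 1): if num % i == 0: return False' — the loop body, one step per index
def pvTrial (num : Int) : List Int → Bool
  | [] => true
  | i :: rest => if PySem.Int.mod num i == 0 then false else pvTrial num rest

-- int(num**0.5) ported as Nat.sqrt: exact for the nonnegative num ≤ 2^31 that reach it under Dom
def is_prime (num : Int) : Bool :=
  if num ≤ 1 then false
  else pvTrial num (PySem.List.pyRange 2 ((Nat.sqrt num.toNat : Int) + 1) 1)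

-- 'power = num; while power <= b: powers_of_primes.add(power); power *= num'.  The Nat fuel
-- only makes the recursion total; it is always sufficient at the call site (power grows by a
-- factor num ≥ 2 each step), so the computation is Python's.
def pvPowerLoop (b num : Int) : Nat → Int → PySem.Set Int → PySem.Set Int
  | 0, _, s => s
  | fuel + 1, power, s =>
    if power ≤ b then pvPowerLoop b num fuel (power * num) (PySem.Set.add s power) else s

def prime_powers (a : Int) (b : Int) : List Int × List Int :=
  let st := (PySem.List.pyRange a (b + 1) 1).foldl
    (fun st num =>
      if is_prime num then
        (PySem.Set.add st.1 num, pvPowerLoop b num ((b + 1 - num).toNat) num st.2)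
      else st)
    ((PySem.Set.empty, PySem.Set.empty) : PySem.Set Int × PySem.Set Int)
  (st.1, PySem.Set.diff st.2 st.1)

-- ===== PORT B =====
-- 'sieve[i*i::i] = zeros' — the elementwise writes that slice assignment performs
def pvSieveMark (b i : Int) (s : List Bool) : List Bool :=
  (PySem.List.pyRange (i * i) (b + 1) i).foldl (fun s j => PySem.List.pySetD s j false) s

-- 'i = 2; while i*i <= b: if sieve[i]: …; i += 1'; the Nat fuel only makes the recursion
-- total — it is always sufficient at the call site (i grows by 1 and stays ≤ b in the loop).
def pvSieveLoop (b : Int) : Nat → Int → List Bool → List Bool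
  | 0, _, s => s
  | fuel + 1, i, s =>
    if i * i ≤ b then
      pvSieveLoop b fuel (i + 1) (if PySem.List.pyGetD s i false then pvSieveMark b i s else s)
    else s

-- 'q = p*p; while q <= b: powers.add(q); q *= p'; Nat fuel as above (p is a prime, p ≥ 2)
def pvAltPowLoop (b p : Int) : Nat → Int → PySem.Set Int → PySem.Set Int
  | 0, _, s => s
  | fuel + 1, q, s =>
    if q ≤ b then pvAltPowLoop b p fuel (q * p) (PySem.Set.add s q) else s

def prime_powers_alt (a : Int) (b : Int) : List Int × List Int :=
  if b < 2 then ([], [])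
  else
    let sieve := pvSieveLoop b (b + 1).toNat 2
      (PySem.List.pySetD (PySem.List.pySetD (List.replicate (b + 1).toNat true) 0 false) 1 false)
    let primes := (PySem.List.pyRange (max a 2) (b + 1) 1).filter
      (fun n => PySem.List.pyGetD sieve n false)
    let powers := primes.foldl
      (fun s p => pvAltPowLoop b p ((b + 1 - p * p).toNat) (p * p) s) PySem.Set.empty
    (PySem.Set.ofList primes, powers)

-- ===== PRECONDITION & SPEC =====
def Spec_prime_powers (a : Int) (b : Int) (out : List Int × List Int) : Prop := out = prime_powers_alt a b
instance (a : Int) (b : Int) (out : List Int × List Int) : Decidable (Spec_prime_powers a b out) := by unfold Spec_prime_powers; infer_instance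

-- ===== CLAIM (what is proved, stated in full; the proofs are below) =====
def Claim_equal_prime_powers : Prop := ∀ (a : Int) (b : Int), Dom_prime_powers a b → Spec_prime_powers a b (prime_powers a b)

-- ===== LEMMAS AND PROOFS =====

-- the abstract power chain q, q*p, q*p², … ≤ b that both power loops insert
def pvChain (b p q : Int) : List Int :=
  if h : q ≤ b ∧ 2 ≤ p ∧ 1 ≤ q then q :: pvChain b p (q * p) else []
termination_by (b + 1 - q).toNat
decreasing_by
  obtain ⟨h1, h2, h3⟩ := h
  have : q + 1 ≤ q * p := by nlinarith
  omega

-- numbers struck out by the sieve once the outer loop has reached i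
def pvCleared (i n : Int) : Prop :=
  ∃ p : Int, 2 ≤ p ∧ p < i ∧ Nat.Prime p.toNat ∧ p ∣ n ∧ p * p ≤ n

-- the sieve-loop invariant
def pvInv (b i : Int) (s : List Bool) : Prop :=
  s.length = (b + 1).toNat ∧ ∀ n : Int, 0 ≤ n → n ≤ b →
    (s.getD n.toNat false = true ↔ (2 ≤ n ∧ ¬ pvCleared i n))

theorem pvTrial_eq_true (num : Int) (l : List Int) :
    pvTrial num l = true ↔ ∀ i ∈ l, ¬ i ∣ num := by
  induction l with
  | nil => simp [pvTrial]
  | cons i rest ih =>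
    by_cases h : PySem.Int.mod num i = 0
    · have hd : i ∣ num := (PySem.Int.mod_eq_zero_iff_dvd num i).mp h
      simp [pvTrial, h, hd]
    · have hd : ¬ i ∣ num := fun hdvd => h ((PySem.Int.mod_eq_zero_iff_dvd num i).mpr hdvd)
      simp [pvTrial, h, ih, hd]

theorem is_prime_eq (num : Int) :
    is_prime num = decide (2 ≤ num ∧ Nat.Prime num.toNat) := by
  by_cases h1 : num ≤ 1
  · rw [is_prime, if_pos h1]
    have : ¬ (2 ≤ num ∧ Nat.Prime num.toNat) := by rintro ⟨h2, _⟩; omega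
    simp [this]
  · have h2 : 2 ≤ num := by omega
    have hnum : ((num.toNat : Int)) = num := Int.toNat_of_nonneg (by omega)
    rw [is_prime, if_neg (by omega)]
    have key : pvTrial num (PySem.List.pyRange 2 ((Nat.sqrt num.toNat : Int) + 1) 1) = true
        ↔ Nat.Prime num.toNat := by
      rw [pvTrial_eq_true]
      constructor
      · intro hall
        rw [Nat.prime_def_le_sqrt]
        refine ⟨by omega, ?_⟩
        intro m hm2 hms hdvd
        have hmmem : (m : Int) ∈ PySem.List.pyRange 2 ((Nat.sqrt num.toNat : Int) + 1) 1 := by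
          rw [PySem.List.mem_pyRange_one]
          constructor
          · exact_mod_cast hm2
          · have : (m : Int) ≤ (Nat.sqrt num.toNat : Int) := by exact_mod_cast hms
            omega
        refine hall _ hmmem ?_
        rw [← hnum]
        exact_mod_cast hdvd
      · intro hp i hi hdvd
        rw [PySem.List.mem_pyRange_one] at hi
        have hi2 : 2 ≤ i := hi.1
        have hdn : i.toNat ∣ num.toNat := by
          have : ((i.toNat : Int)) ∣ ((num.toNat : Int)) := by
            rw [hnum, Int.toNat_of_nonneg (by omega : (0:Int) ≤ i)]
            exact hdvd
          exact_mod_cast this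
        exact (Nat.prime_def_le_sqrt.mp hp).2 i.toNat (by omega) (by omega) hdn
    rw [Bool.eq_iff_iff, key, decide_eq_true_eq]
    constructor
    · exact fun h => ⟨h2, h⟩
    · exact And.right

theorem pv_chain_cons {b p q : Int} (h : q ≤ b ∧ 2 ≤ p ∧ 1 ≤ q) :
    pvChain b p q = q :: pvChain b p (q * p) := by
  rw [pvChain, dif_pos h]

theorem pvPowerLoop_eq (b p : Int) : ∀ (fuel : Nat) (q : Int) (s : PySem.Set Int),
    2 ≤ p → 1 ≤ q → (b + 1 - q).toNat ≤ fuel →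
    pvPowerLoop b p fuel q s = PySem.Set.update s (pvChain b p q) := by
  intro fuel
  induction fuel with
  | zero =>
    intro q s h2 h1 hf
    simp only [pvPowerLoop]
    rw [pvChain, dif_neg (by omega), PySem.Set.update_nil]
  | succ f ih =>
    intro q s h2 h1 hf
    simp only [pvPowerLoop]
    by_cases hq : q ≤ b
    · have hstep : q + 1 ≤ q * p := by nlinarith
      rw [if_pos hq, ih (q * p) (PySem.Set.add s q) h2 (by nlinarith) (by omega),
        pv_chain_cons ⟨hq, h2, h1⟩, PySem.Set.update_cons]
    · rw [if_neg hq, pvChain, dif_neg (by omega), PySem.Set.update_nil]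

theorem pvAltPowLoop_eq (b p : Int) : ∀ (fuel : Nat) (q : Int) (s : PySem.Set Int),
    2 ≤ p → 1 ≤ q → (b + 1 - q).toNat ≤ fuel →
    pvAltPowLoop b p fuel q s = PySem.Set.update s (pvChain b p q) := by
  intro fuel
  induction fuel with
  | zero =>
    intro q s h2 h1 hf
    simp only [pvAltPowLoop]
    rw [pvChain, dif_neg (by omega), PySem.Set.update_nil]
  | succ f ih =>
    intro q s h2 h1 hf
    simp only [pvAltPowLoop]
    by_cases hq : q ≤ b
    · have hstep : q + 1 ≤ q * p := by nlinarith
      rw [if_pos hq, ih (q * p) (PySem.Set.add s q) h2 (by nlinarith) (by omega),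
        pv_chain_cons ⟨hq, h2, h1⟩, PySem.Set.update_cons]
    · rw [if_neg hq, pvChain, dif_neg (by omega), PySem.Set.update_nil]

theorem pv_mem_chain (b p q : Int) :
    ∀ x ∈ pvChain b p q, (∃ k : Nat, x = q * p ^ k) ∧ q ≤ x ∧ x ≤ b := by
  induction q using pvChain.induct b p with
  | case1 q h ih =>
    intro x hx
    rw [pvChain, dif_pos h] at hx
    obtain ⟨h1, h2, h3⟩ := h
    rcases List.mem_cons.mp hx with rfl | hx'
    · exact ⟨⟨0, by ring⟩, le_refl _, h1⟩
    · obtain ⟨⟨k, hk⟩, hle, hb'⟩ := ih x hx'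
      refine ⟨⟨k + 1, by rw [hk]; ring⟩, ?_, hb'⟩
      nlinarith
  | case2 q h =>
    intro x hx
    rw [pvChain, dif_neg h] at hx
    cases hx

theorem pv_chain_pairwise (b p q : Int) : (pvChain b p q).Pairwise (· < ·) := by
  induction q using pvChain.induct b p with
  | case1 q h ih =>
    rw [pvChain, dif_pos h]
    refine List.Pairwise.cons ?_ ih
    intro y hy
    obtain ⟨h1, h2, h3⟩ := h
    have := (pv_mem_chain b p (q * p) y hy).2.1
    nlinarith
  | case2 q h =>
    rw [pvChain, dif_neg h]
    exact List.Pairwise.nil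

theorem pv_chain_powers {b p x : Int} (_hp : 2 ≤ p) {e : Nat} (_he : 1 ≤ e)
    (hx : x ∈ pvChain b p (p ^ e)) : ∃ m : Nat, e ≤ m ∧ x = p ^ m := by
  obtain ⟨⟨k, hk⟩, _, _⟩ := pv_mem_chain b p (p ^ e) x hx
  exact ⟨e + k, by omega, by rw [hk, ← pow_add]⟩

-- every composite n ≥ 2 has a prime factor p < n with p² ≤ n
theorem pv_not_prime_factor {n : Int} (h2 : 2 ≤ n) (hnp : ¬ Nat.Prime n.toNat) :
    ∃ p : Int, 2 ≤ p ∧ p < n ∧ Nat.Prime p.toNat ∧ p ∣ n ∧ p * p ≤ n := by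
  have hn0 : 0 < n.toNat := by omega
  have hn1 : n.toNat ≠ 1 := by omega
  have hmp : Nat.Prime n.toNat.minFac := Nat.minFac_prime hn1
  have hmd : n.toNat.minFac ∣ n.toNat := Nat.minFac_dvd _
  have hsq : n.toNat.minFac ^ 2 ≤ n.toNat := Nat.minFac_sq_le_self hn0 hnp
  have hm2 : 2 ≤ n.toNat.minFac := hmp.two_le
  set m := n.toNat.minFac with hmdef
  have hmmn : m * m ≤ n.toNat := by nlinarith [hsq]
  refine ⟨(m : Int), by exact_mod_cast hm2, ?_, by simpa using hmp, ?_, ?_⟩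
  · have : m < n.toNat := by nlinarith
    omega
  · have : (m : Int) ∣ ((n.toNat : Int)) := Int.natCast_dvd_natCast.mpr hmd
    rwa [Int.toNat_of_nonneg (by omega)] at this
  · have h' : ((m : Int)) * m ≤ ((n.toNat : Int)) := by exact_mod_cast hmmn
    rwa [Int.toNat_of_nonneg (by omega)] at h'

-- a proper divisor 2 ≤ p < n kills primality of n
theorem pv_prime_no_factor {n p : Int} (h2 : 2 ≤ n) (hp2 : 2 ≤ p) (hlt : p < n)
    (hdvd : p ∣ n) : ¬ Nat.Prime n.toNat := by
  intro hpr
  have hd : p.toNat ∣ n.toNat := by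
    have : ((p.toNat : Int)) ∣ ((n.toNat : Int)) := by
      rw [Int.toNat_of_nonneg (by omega : (0:Int) ≤ p),
        Int.toNat_of_nonneg (by omega : (0:Int) ≤ n)]
      exact hdvd
    exact_mod_cast this
  rcases hpr.eq_one_or_self_of_dvd _ hd with h | h <;> omega

theorem pv_pow_eq_prime {p q : Int} (hp : 2 ≤ p) (hq : 2 ≤ q)
    (hpp : Nat.Prime p.toNat) (hqp : Nat.Prime q.toNat)
    (j k : Nat) (hx : p ^ (j + 1) = q ^ (k + 1)) : p = q := by
  have hptn : ((p.toNat : Int)) = p := Int.toNat_of_nonneg (by omega)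
  have hqtn : ((q.toNat : Int)) = q := Int.toNat_of_nonneg (by omega)
  have hcast : ((p.toNat : Int)) ^ (j + 1) = ((q.toNat : Int)) ^ (k + 1) := by
    rw [hptn, hqtn]; exact hx
  have hnat : p.toNat ^ (j + 1) = q.toNat ^ (k + 1) := by exact_mod_cast hcast
  have hdvd : p.toNat ∣ q.toNat ^ (k + 1) := by
    rw [← hnat]; exact dvd_pow_self _ (by omega)
  have := (Nat.prime_dvd_prime_iff_eq hpp hqp).mp (hpp.dvd_of_dvd_pow hdvd)
  omega

-- p^m for m ≥ 2 is composite
theorem pv_pow_not_prime {p : Int} (hp : 2 ≤ p) {m : Nat} (hm : 2 ≤ m) :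
    ¬ Nat.Prime (p ^ m).toNat := by
  have hsq : p * p ≤ p ^ m := by
    calc p * p = p ^ 2 := by ring
    _ ≤ p ^ m := pow_le_pow_right₀ (by omega) hm
  have h2x : 2 ≤ p ^ m := by nlinarith
  have hlt : p < p ^ m := by nlinarith
  exact pv_prime_no_factor h2x hp hlt (dvd_pow_self p (by omega))

theorem pv_mark_length (l : List Int) (s : List Bool) :
    (l.foldl (fun s j => PySem.List.pySetD s j false) s).length = s.length := by
  induction l generalizing s with
  | nil => rfl
  | cons j t ih => rw [List.foldl_cons, ih, PySem.List.length_pySetD]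

theorem pv_mark_getD (l : List Int) (hl : ∀ j ∈ l, 0 ≤ j) (s : List Bool) (m : Nat) :
    (l.foldl (fun s j => PySem.List.pySetD s j false) s).getD m false
      = if (m : Int) ∈ l then false else s.getD m false := by
  induction l generalizing s with
  | nil => simp
  | cons j t ih =>
    have hj : 0 ≤ j := hl j (List.mem_cons_self)
    rw [List.foldl_cons, ih (fun x hx => hl x (List.mem_cons_of_mem _ hx)),
      PySem.List.pySetD_of_nonneg _ _ hj]
    by_cases hm : (m : Int) ∈ t
    · simp [hm]
    · simp only [hm, if_false, List.mem_cons, or_false]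
      by_cases he : (m : Int) = j
      · have hjm : j.toNat = m := by omega
        rw [if_pos he, hjm, List.getD_eq_getElem?_getD, List.getElem?_set]
        by_cases hlen : m < s.length <;> simp [hlen]
      · have hjm : j.toNat ≠ m := by omega
        rw [if_neg he, List.getD_eq_getElem?_getD, List.getElem?_set,
          if_neg hjm, ← List.getD_eq_getElem?_getD]

theorem pv_inv_step (b i : Int) (s : List Bool) (hi2 : 2 ≤ i) (hib : i * i ≤ b)
    (hinv : pvInv b i s) :
    pvInv b (i + 1) (if PySem.List.pyGetD s i false then pvSieveMark b i s else s) := by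
  have hi0 : (0:Int) ≤ i := by omega
  have hii : i ≤ i * i := by nlinarith
  have hiib : i ≤ b := le_trans hii hib
  by_cases hgb : PySem.List.pyGetD s i false = true
  · -- sieve[i] is set: i is prime; its multiples from i² get cleared
    rw [if_pos hgb]
    have hsi : s.getD i.toNat false = true := by
      rwa [PySem.List.pyGetD_of_nonneg _ _ hi0] at hgb
    have hclean := ((hinv.2 i hi0 hiib).mp hsi).2
    have hip : Nat.Prime i.toNat := by
      by_contra hnp
      obtain ⟨p, hp2, hplt, hppr, hpd, hpsq⟩ := pv_not_prime_factor hi2 hnp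
      exact hclean ⟨p, hp2, hplt, hppr, hpd, hpsq⟩
    constructor
    · rw [pvSieveMark, pv_mark_length]; exact hinv.1
    · intro n hn0 hnb
      have hrange : ∀ j ∈ PySem.List.pyRange (i * i) (b + 1) i, (0:Int) ≤ j := by
        intro j hj
        have := ((PySem.List.mem_pyRange_iff_of_pos (by omega) j).mp hj).1
        nlinarith
      rw [pvSieveMark, pv_mark_getD _ hrange, Int.toNat_of_nonneg hn0]
      have hmem : n ∈ PySem.List.pyRange (i * i) (b + 1) i ↔ (i * i ≤ n ∧ i ∣ n) := by
        rw [PySem.List.mem_pyRange_iff_of_pos (by omega)]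
        constructor
        · rintro ⟨ha1, ha2, ha3⟩
          refine ⟨ha1, ?_⟩
          have : i ∣ (n - i * i) + i * i := dvd_add ha3 (Dvd.intro i rfl)
          simpa using this
        · rintro ⟨ha1, ha3⟩
          exact ⟨ha1, by omega, dvd_sub ha3 (Dvd.intro i rfl)⟩
      have hcl : pvCleared (i + 1) n ↔ (pvCleared i n ∨ (i ∣ n ∧ i * i ≤ n)) := by
        constructor
        · rintro ⟨p, hp2, hplt, hppr, hpd, hpsq⟩
          by_cases hpi : p = i
          · subst hpi; exact Or.inr ⟨hpd, hpsq⟩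
          · exact Or.inl ⟨p, hp2, by omega, hppr, hpd, hpsq⟩
        · rintro (⟨p, hp2, hplt, hppr, hpd, hpsq⟩ | ⟨hd, hsq⟩)
          · exact ⟨p, hp2, by omega, hppr, hpd, hpsq⟩
          · exact ⟨i, hi2, by omega, hip, hd, hsq⟩
      by_cases hmk : i * i ≤ n ∧ i ∣ n
      · rw [if_pos (hmem.mpr hmk)]
        have : pvCleared (i + 1) n := ⟨i, hi2, by omega, hip, hmk.2, hmk.1⟩
        simp [this]
      · rw [if_neg (fun hmm => hmk (hmem.mp hmm)), hinv.2 n hn0 hnb, hcl]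
        tauto
  · -- sieve[i] already cleared: i is composite, nothing changes
    rw [if_neg hgb]
    have hsi : ¬ s.getD i.toNat false = true := by
      rwa [PySem.List.pyGetD_of_nonneg _ _ hi0] at hgb
    have hcli : pvCleared i i := by
      by_contra hnc
      exact hsi ((hinv.2 i hi0 hiib).mpr ⟨hi2, hnc⟩)
    have hinp : ¬ Nat.Prime i.toNat := by
      obtain ⟨p, hp2, hplt, hppr, hpd, hpsq⟩ := hcli
      exact pv_prime_no_factor hi2 hp2 hplt hpd
    refine ⟨hinv.1, ?_⟩
    intro n hn0 hnb
    rw [hinv.2 n hn0 hnb]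
    have hcl : pvCleared (i + 1) n ↔ pvCleared i n := by
      constructor
      · rintro ⟨p, hp2, hplt, hppr, hpd, hpsq⟩
        by_cases hpi : p = i
        · subst hpi; exact absurd hppr hinp
        · exact ⟨p, hp2, by omega, hppr, hpd, hpsq⟩
      · rintro ⟨p, hp2, hplt, hppr, hpd, hpsq⟩
        exact ⟨p, hp2, by omega, hppr, hpd, hpsq⟩
    rw [hcl]

theorem pv_sieve_final (b i : Int) (s : List Bool) (hi2 : 2 ≤ i) (hbi : b < i * i) (hinv : pvInv b i s)
    (n : Int) (hn0 : 0 ≤ n) (hnb : n ≤ b) :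
    (s.getD n.toNat false = true ↔ 2 ≤ n ∧ Nat.Prime n.toNat) := by
    rw [hinv.2 n hn0 hnb]
    constructor
    · rintro ⟨h2n, hnc⟩
      refine ⟨h2n, ?_⟩
      by_contra hnp
      obtain ⟨p, hp2, hplt, hppr, hpd, hpsq⟩ := pv_not_prime_factor h2n hnp
      exact hnc ⟨p, hp2, by nlinarith, hppr, hpd, hpsq⟩
    · rintro ⟨h2n, hpr⟩
      refine ⟨h2n, ?_⟩
      rintro ⟨p, hp2, hplt, hppr, hpd, hpsq⟩
      exact (pv_prime_no_factor h2n hp2 (by nlinarith) hpd) hpr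


theorem pv_sieve_loop_spec (b : Int) : ∀ (fuel : Nat) (i : Int) (s : List Bool), 2 ≤ i →
    (b + 1 - i).toNat ≤ fuel → pvInv b i s →
    ∀ n : Int, 0 ≤ n → n ≤ b →
      ((pvSieveLoop b fuel i s).getD n.toNat false = true ↔ 2 ≤ n ∧ Nat.Prime n.toNat) := by
  intro fuel
  induction fuel with
  | zero =>
    intro i s hi hf hinv n hn0 hnb
    have hbig : b < i := by omega
    have hbi : b < i * i := by nlinarith
    simp only [pvSieveLoop]
    exact pv_sieve_final b i s hi hbi hinv n hn0 hnb
  | succ f ih =>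
    intro i s hi hf hinv n hn0 hnb
    simp only [pvSieveLoop]
    by_cases hib : i * i ≤ b
    · rw [if_pos hib]
      have hii : i ≤ i * i := by nlinarith
      have hile : i ≤ b := le_trans hii hib
      exact ih (i + 1) _ (by omega) (by omega)
        (pv_inv_step b i s hi hib hinv) n hn0 hnb
    · rw [if_neg hib]
      exact pv_sieve_final b i s hi (lt_of_not_ge hib) hinv n hn0 hnb

theorem pv_init_inv (b : Int) (hb : 2 ≤ b) :
    pvInv b 2 (PySem.List.pySetD (PySem.List.pySetD
      (List.replicate (b + 1).toNat true) 0 false) 1 false) := by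
  rw [PySem.List.pySetD_of_nonneg _ _ (by norm_num : (0:Int) ≤ 0),
    PySem.List.pySetD_of_nonneg _ _ (by norm_num : (0:Int) ≤ 1)]
  constructor
  · simp
  · intro n hn0 hnb
    have hnc : ¬ pvCleared 2 n := by rintro ⟨p, hp2, hplt, _⟩; omega
    have hlt : n.toNat < (b + 1).toNat := by omega
    rw [List.getD_eq_getElem?_getD, List.getElem?_set, List.getElem?_set,
      List.getElem?_replicate]
    simp only [List.length_set, List.length_replicate]
    rcases show n.toNat = 0 ∨ n.toNat = 1 ∨ 2 ≤ n.toNat by omega with h1 | h1 | h1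
    · rw [if_neg (by omega), if_pos (by omega), if_pos (by omega)]
      simp only [Option.getD_some, Bool.false_eq_true, false_iff]
      rintro ⟨h2n, _⟩
      omega
    · rw [if_pos (by omega), if_pos (by omega)]
      simp only [Option.getD_some, Bool.false_eq_true, false_iff]
      rintro ⟨h2n, _⟩
      omega
    · rw [if_neg (by omega), if_neg (by omega), if_pos (by omega)]
      simp only [Option.getD_some]
      constructor
      · intro _
        exact ⟨by omega, hnc⟩
      · intro _
        trivial

theorem pv_sieve_test (b n : Int) (hb : 2 ≤ b) (hn : 2 ≤ n) (hnb : n ≤ b) :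
    PySem.List.pyGetD (pvSieveLoop b (b + 1).toNat 2 (PySem.List.pySetD (PySem.List.pySetD
        (List.replicate (b + 1).toNat true) 0 false) 1 false)) n false
      = is_prime n := by
  rw [PySem.List.pyGetD_of_nonneg _ _ (by omega : (0:Int) ≤ n), is_prime_eq,
    Bool.eq_iff_iff, decide_eq_true_eq,
    pv_sieve_loop_spec b (b + 1).toNat 2 _ (by norm_num) (by omega)
      (pv_init_inv b hb) n (by omega) hnb]

theorem pv_fold_add : ∀ (P : List Int) (s : PySem.Set Int), P.Nodup →
    (∀ x ∈ P, x ∉ s) → P.foldl PySem.Set.add s = s ++ P := by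
  intro P
  induction P with
  | nil => intro s _ _; simp
  | cons x t ih =>
    intro s hnd hdis
    have hdis' : ∀ y ∈ t, y ∉ s ++ [x] := by
      intro y hy hmem
      rcases List.mem_append.mp hmem with h' | h'
      · exact hdis y (List.mem_cons_of_mem _ hy) h'
      · rw [List.mem_singleton] at h'
        subst h'
        exact (List.nodup_cons.mp hnd).1 hy
    rw [List.foldl_cons, PySem.Set.add_of_not_mem (hdis x List.mem_cons_self),
      ih (s ++ [x]) (List.Nodup.of_cons hnd) hdis']
    simp

theorem pv_fold_update (g : Int → List Int) (F : PySem.Set Int → Int → PySem.Set Int) :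
    ∀ (P : List Int), (∀ p ∈ P, ∀ t, F t p = PySem.Set.update t (g p)) →
    ∀ (s : PySem.Set Int), P.foldl F s = PySem.Set.update s (P.flatMap g) := by
  intro P
  induction P with
  | nil => intro _ s; simp [PySem.Set.update_nil]
  | cons x t ih =>
    intro hF s
    rw [List.foldl_cons, hF x List.mem_cons_self,
      ih (fun p hp => hF p (List.mem_cons_of_mem _ hp)), List.flatMap_cons,
      PySem.Set.update_append]

theorem pv_PA_mem {a b x : Int}
    (hx : x ∈ (PySem.List.pyRange a (b + 1) 1).filter is_prime) :
    2 ≤ x ∧ x ≤ b ∧ Nat.Prime x.toNat := by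
  rw [List.mem_filter] at hx
  have h1 := hx.1
  rw [PySem.List.mem_pyRange_one] at h1
  have h2 := hx.2
  rw [is_prime_eq, decide_eq_true_eq] at h2
  exact ⟨h2.1, by omega, h2.2⟩

-- A unpacked: primes-in-range as a filter, the power set as one flat chain list
theorem pv_A_eq (a b : Int) :
    prime_powers a b =
      ((PySem.List.pyRange a (b + 1) 1).filter is_prime,
       PySem.Set.diff
         (PySem.Set.ofList (((PySem.List.pyRange a (b + 1) 1).filter is_prime).flatMap
           (fun p => pvChain b p p)))
         ((PySem.List.pyRange a (b + 1) 1).filter is_prime)) := by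
  unfold prime_powers
  have hstep : (fun (st : PySem.Set Int × PySem.Set Int) num =>
      if is_prime num then
        (PySem.Set.add st.1 num, pvPowerLoop b num ((b + 1 - num).toNat) num st.2)
      else st)
    = (fun st num => ((fun s num => if is_prime num then PySem.Set.add s num else s) st.1 num,
        (fun t num => if is_prime num then pvPowerLoop b num ((b + 1 - num).toNat) num t else t)
          st.2 num)) := by
    funext st num
    by_cases h : is_prime num <;> simp [h]
  have hc1 : (PySem.List.pyRange a (b + 1) 1).foldl
      (fun s num => if is_prime num then PySem.Set.add s num else s) PySem.Set.empty
      = (PySem.List.pyRange a (b + 1) 1).filter is_prime := by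
    rw [← List.foldl_filter,
      pv_fold_add _ _ (List.Nodup.filter _ (PySem.List.nodup_pyRange_one a (b + 1)))
        (by intro x _ hx; cases hx)]
    rfl
  have hc2 : (PySem.List.pyRange a (b + 1) 1).foldl
      (fun t num => if is_prime num then pvPowerLoop b num ((b + 1 - num).toNat) num t else t)
        PySem.Set.empty
      = PySem.Set.ofList (((PySem.List.pyRange a (b + 1) 1).filter is_prime).flatMap
          (fun p => pvChain b p p)) := by
    rw [← List.foldl_filter,
      pv_fold_update (fun p => pvChain b p p)
        (fun t p => pvPowerLoop b p ((b + 1 - p).toNat) p t) _ ?_ PySem.Set.empty,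
      PySem.Set.update_empty]
    intro p hp t
    obtain ⟨hp2, hpb, _⟩ := pv_PA_mem hp
    exact pvPowerLoop_eq b p _ p t hp2 (by omega) (le_refl _)
  simp only [hstep]
  rw [PySem.List.foldl_prod_mk (fun s num => if is_prime num then PySem.Set.add s num else s)
    (fun t num => if is_prime num then pvPowerLoop b num ((b + 1 - num).toNat) num t else t)
    (PySem.List.pyRange a (b + 1) 1) PySem.Set.empty PySem.Set.empty, hc1, hc2]

-- B unpacked the same way, the sieve test replaced by is_prime
theorem pv_B_eq (a b : Int) (hb : 2 ≤ b) :
    prime_powers_alt a b =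
      ((PySem.List.pyRange (max a 2) (b + 1) 1).filter is_prime,
       PySem.Set.ofList (((PySem.List.pyRange (max a 2) (b + 1) 1).filter is_prime).flatMap
         (fun p => pvChain b p (p * p)))) := by
  unfold prime_powers_alt
  rw [if_neg (by omega)]
  have hfilter : (PySem.List.pyRange (max a 2) (b + 1) 1).filter
      (fun n => PySem.List.pyGetD (pvSieveLoop b (b + 1).toNat 2 (PySem.List.pySetD
        (PySem.List.pySetD (List.replicate (b + 1).toNat true) 0 false) 1 false)) n false)
    = (PySem.List.pyRange (max a 2) (b + 1) 1).filter is_prime := by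
    apply List.filter_congr
    intro n hn
    rw [PySem.List.mem_pyRange_one] at hn
    exact pv_sieve_test b n hb (by omega) (by omega)
  have hfold : ((PySem.List.pyRange (max a 2) (b + 1) 1).filter is_prime).foldl
      (fun s p => pvAltPowLoop b p ((b + 1 - p * p).toNat) (p * p) s) PySem.Set.empty
      = PySem.Set.ofList (((PySem.List.pyRange (max a 2) (b + 1) 1).filter is_prime).flatMap
          (fun p => pvChain b p (p * p))) := by
    rw [pv_fold_update (fun p => pvChain b p (p * p))
        (fun s p => pvAltPowLoop b p ((b + 1 - p * p).toNat) (p * p) s) _ ?_ PySem.Set.empty,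
      PySem.Set.update_empty]
    intro p hp t
    obtain ⟨hp2, hpb, _⟩ := pv_PA_mem hp
    exact pvAltPowLoop_eq b p _ (p * p) t hp2 (by nlinarith) (le_refl _)
  simp only [hfilter, hfold]
  rw [PySem.Set.ofList_eq_self_of_nodup _
    (List.Nodup.filter _ (PySem.List.nodup_pyRange_one (max a 2) (b + 1)))]

theorem pv_primes_eq (a b : Int) (hb : 2 ≤ b) :
    (PySem.List.pyRange a (b + 1) 1).filter is_prime
      = (PySem.List.pyRange (max a 2) (b + 1) 1).filter is_prime := by
  by_cases ha : a ≤ b + 1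
  · rw [PySem.List.pyRange_one_append a (max a 2) (b + 1) (le_max_left _ _)
      (max_le ha (by omega)), List.filter_append]
    have hlow : (PySem.List.pyRange a (max a 2) 1).filter is_prime = [] := by
      rw [List.filter_eq_nil_iff]
      intro x hx
      rw [PySem.List.mem_pyRange_one] at hx
      rw [is_prime_eq, decide_eq_true_eq]
      rintro ⟨h2x, _⟩
      omega
    rw [hlow, List.nil_append]
  · rw [PySem.List.pyRange_one_eq_nil (by omega),
      PySem.List.pyRange_one_eq_nil (by omega : b + 1 ≤ max a 2)]

theorem pv_flat_nodup (b : Int) (P : List Int) (hP : P.Nodup)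
    (hmem : ∀ p ∈ P, 2 ≤ p ∧ Nat.Prime p.toNat) (g : Int → List Int)
    (hg : ∀ p ∈ P, ∃ e : Nat, 1 ≤ e ∧ g p = pvChain b p (p ^ e)) :
    (P.flatMap g).Nodup := by
  rw [List.nodup_flatMap]
  constructor
  · intro p hp
    obtain ⟨e, _, hge⟩ := hg p hp
    rw [hge]
    exact (pv_chain_pairwise b p (p ^ e)).imp (fun h => ne_of_lt h)
  · refine List.Pairwise.imp_of_mem ?_ hP
    intro p q hpmem hqmem hne
    obtain ⟨e, he, hge⟩ := hg p hpmem
    obtain ⟨f, hf, hgf⟩ := hg q hqmem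
    rw [Function.onFun, hge, hgf]
    intro x hx1 hx2
    obtain ⟨m, hm, rfl⟩ := pv_chain_powers (hmem p hpmem).1 he hx1
    obtain ⟨m', hm', heq⟩ := pv_chain_powers (hmem q hqmem).1 hf hx2
    refine hne (pv_pow_eq_prime (hmem p hpmem).1 (hmem q hqmem).1
      (hmem p hpmem).2 (hmem q hqmem).2 (m - 1) (m' - 1) ?_)
    rw [Nat.sub_add_cancel (by omega), Nat.sub_add_cancel (by omega)]
    exact heq

theorem pv_diff_eq (b : Int) (P : List Int) (hP : P.Nodup)
    (hmem : ∀ p ∈ P, 2 ≤ p ∧ p ≤ b ∧ Nat.Prime p.toNat) :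
    PySem.Set.diff (PySem.Set.ofList (P.flatMap (fun p => pvChain b p p))) P
      = PySem.Set.ofList (P.flatMap (fun p => pvChain b p (p * p))) := by
  have hmem' : ∀ p ∈ P, 2 ≤ p ∧ Nat.Prime p.toNat :=
    fun p hp => ⟨(hmem p hp).1, (hmem p hp).2.2⟩
  have hA : (P.flatMap (fun p => pvChain b p p)).Nodup := by
    refine pv_flat_nodup b P hP hmem' _ ?_
    intro p hp
    exact ⟨1, le_refl 1, by rw [pow_one]⟩
  have hB : (P.flatMap (fun p => pvChain b p (p * p))).Nodup := by
    refine pv_flat_nodup b P hP hmem' _ ?_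
    intro p hp
    exact ⟨2, by norm_num, by rw [pow_two]⟩
  rw [PySem.Set.ofList_eq_self_of_nodup _ hA, PySem.Set.ofList_eq_self_of_nodup _ hB]
  show List.filter _ _ = _
  rw [List.filter_flatMap]
  refine List.flatMap_congr ?_
  intro p hp
  obtain ⟨hp2, hpb, hppr⟩ := hmem p hp
  rw [pv_chain_cons ⟨hpb, hp2, by omega⟩, List.filter_cons]
  have hcp : (!(PySem.Set.contains P p)) = false := by
    simp [hp]
  rw [hcp, if_neg (by simp)]
  rw [List.filter_eq_self]
  intro x hx
  rw [show p * p = p ^ 2 by ring] at hx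
  obtain ⟨m, hm, rfl⟩ := pv_chain_powers hp2 (by norm_num : 1 ≤ 2) hx
  have hnotp : ¬ Nat.Prime ((p ^ m).toNat) := pv_pow_not_prime hp2 hm
  have hnotin : p ^ m ∉ P := fun hin => hnotp (hmem' _ hin).2
  simp [hnotin]

theorem pv_main (a b : Int) : prime_powers a b = prime_powers_alt a b := by
  by_cases hb : b < 2
  · rw [pv_A_eq]
    have hP : (PySem.List.pyRange a (b + 1) 1).filter is_prime = [] := by
      rw [List.filter_eq_nil_iff]
      intro x hx
      rw [PySem.List.mem_pyRange_one] at hx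
      rw [is_prime_eq, decide_eq_true_eq]
      rintro ⟨h2x, _⟩
      omega
    rw [hP, prime_powers_alt, if_pos hb]
    simp [PySem.Set.diff, PySem.Set.ofList]
  · rw [not_lt] at hb
    rw [pv_A_eq, pv_B_eq a b hb, pv_primes_eq a b hb]
    refine Prod.ext rfl ?_
    exact pv_diff_eq b _ (List.Nodup.filter _ (PySem.List.nodup_pyRange_one (max a 2) (b + 1)))
      (fun p hp => pv_PA_mem hp)

-- ===== VERDICT (by name: the statement is the Claim_ definition above) =====
theorem prime_powers_spec : Claim_equal_prime_powers := by
  intro a b _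
  unfold Spec_prime_powers
  exact pv_main a b
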